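-- pv_equiv track=rewrite | github.com/BaiYunpeng1949/hierarchical-resource-rational-reader | step5/simulators/simulator_v20250604/results/analyze_aggregated_results/offline_kintsch_text_comprehension_runner/text_comprehension_pipeline_v1.py | _phrase_chunks
-- ===== SOURCE A (Python) =====
-- from typing import List, Dict, Any, Optional
--
-- _STOP = set("""
-- a an and are as at be by for from has have he her hers him his i in is it its
-- of on or our she that the their them they this to was we were will with you your yours not
-- but if then than so such into over under between within without about above below after before
-- """.split())
--
-- def _phrase_chunks(tokens: List[str]) -> List[str]:
--     chunks, cur = [], []
--     for t in tokens:
--         low = t.lower()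
--         if low not in _STOP:
--             cur.append(low)
--         else:
--             if cur:
--                 chunks.append(" ".join(cur))
--                 cur = []
--     if cur:
--         chunks.append(" ".join(cur))
--     return [c for c in chunks if len(c.replace(" ", "")) > 2]
-- ===== SOURCE B (Python) =====
-- from typing import List
--
-- _STOP = set("""
-- a an and are as at be by for from has have he her hers him his i in is it its
-- of on or our she that the their them they this to was we were will with you your yours not
-- but if then than so such into over under between within without about above below after before
-- """.split())
--
-- def _phrase_chunks(tokens: List[str]) -> List[str]:
--     # Staged, index-based approach: lowercase once, record the positions of the
--     # stopword "cuts", then slice the token list between consecutive cuts.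
--     lows = [t.lower() for t in tokens]
--     cuts = [-1] + [i for i, w in enumerate(lows) if w in _STOP] + [len(lows)]
--     chunks = [" ".join(lows[a + 1:b]) for a, b in zip(cuts, cuts[1:]) if b - a > 1]
--     return [c for c in chunks if len(c.replace(" ", "")) > 2]
-- ===== Notes on version B (the rewrite author's own statement) =====
-- stated objective: alternative
-- what changed: Replaces A's streaming (chunks, cur) accumulator loop with a staged index-based computation: lowercase once, collect the positions of stopword 'cuts' via enumerate, then slice the lowered list between consecutive cut positions and join each nonempty slice, finally applying the same length filter.
import Mathlib
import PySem

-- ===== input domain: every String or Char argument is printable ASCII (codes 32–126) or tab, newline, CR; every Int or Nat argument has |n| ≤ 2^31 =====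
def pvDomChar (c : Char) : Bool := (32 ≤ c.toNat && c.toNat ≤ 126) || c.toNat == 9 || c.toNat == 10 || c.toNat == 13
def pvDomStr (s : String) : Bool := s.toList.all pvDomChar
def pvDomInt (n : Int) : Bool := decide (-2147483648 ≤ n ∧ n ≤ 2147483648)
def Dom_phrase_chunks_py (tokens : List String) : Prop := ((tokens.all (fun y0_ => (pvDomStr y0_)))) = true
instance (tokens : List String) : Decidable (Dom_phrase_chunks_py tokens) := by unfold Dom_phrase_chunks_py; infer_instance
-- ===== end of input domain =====

set_option maxRecDepth 4096


-- B replaces A's streaming (chunks, cur) accumulator loop by a staged index-based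
-- computation: find the stopword "cut" positions, then slice between consecutive cuts.

-- ===== PORT A =====
-- the module constant _STOP (a Python set of the split words)
def pvStop : PySem.Set String := PySem.Set.ofList
  ["a", "an", "and", "are", "as", "at", "be", "by", "for", "from", "has", "have", "he", "her",
   "hers", "him", "his", "i", "in", "is", "it", "its", "of", "on", "or", "our", "she", "that",
   "the", "their", "them", "they", "this", "to", "was", "we", "were", "will", "with", "you",
   "your", "yours", "not", "but", "if", "then", "than", "so", "such", "into", "over", "under",
   "between", "within", "without", "about", "above", "below", "after", "before"]

-- one iteration of A's for-loop over state (chunks, cur)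
def pvStepA (st : List String × List String) (t : String) : List String × List String :=
  let low := PySem.Str.lower t
  if (PySem.Set.contains pvStop low) = false then (st.1, st.2 ++ [low])
  else if st.2 ≠ [] then (st.1 ++ [PySem.Str.join " " st.2], ([] : List String))
  else st

def phrase_chunks_py (tokens : List String) : List String :=
  let st := tokens.foldl pvStepA ([], [])
  let chunks := if st.2 ≠ [] then st.1 ++ [PySem.Str.join " " st.2] else st.1
  chunks.filter (fun c => PySem.Str.len (PySem.Str.replace c " " "") > 2)

-- ===== PORT B =====
-- lows = [t.lower() for t in tokens]; cuts = [-1] + [i for i,w in enumerate(lows) if w in _STOP] + [len(lows)];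
-- chunks = [" ".join(lows[a+1:b]) for a,b in zip(cuts, cuts[1:]) if b-a > 1]; return length filter of chunks
def phrase_chunks_py_alt (tokens : List String) : List String :=
  let lows := tokens.map PySem.Str.lower
  let cuts : List Int :=
    [-1] ++ ((PySem.List.enumerate lows 0).filter (fun p => PySem.Set.contains pvStop p.2)).map (fun p => p.1)
         ++ [(lows.length : Int)]
  let chunks := ((cuts.zip (cuts.drop 1)).filter (fun p => p.2 - p.1 > 1)).map
      (fun p => PySem.Str.join " " (PySem.List.slice lows (some (p.1 + 1)) (some p.2)))
  chunks.filter (fun c => PySem.Str.len (PySem.Str.replace c " " "") > 2)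

-- ===== PRECONDITION & SPEC =====
def Spec_phrase_chunks_py (tokens : List String) (out : List String) : Prop := out = phrase_chunks_py_alt tokens
instance (tokens : List String) (out : List String) : Decidable (Spec_phrase_chunks_py tokens out) := by unfold Spec_phrase_chunks_py; infer_instance

-- ===== CLAIM (what is proved, stated in full; the proofs are below) =====
def Claim_equal_phrase_chunks_py : Prop := ∀ (tokens : List String), Dom_phrase_chunks_py tokens → Spec_phrase_chunks_py tokens (phrase_chunks_py tokens)

-- ===== LEMMAS AND PROOFS =====

def pvIsStop (t : String) : Bool := PySem.Set.contains pvStop (PySem.Str.lower t)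

-- middle spec: the chunk list as maximal non-stopword runs (recursive splitter)
def pvGroups : List String → List String
  | [] => []
  | t :: rest =>
    let k := pvIsStop t
    let grp := t :: rest.takeWhile (fun x => pvIsStop x == k)
    let restr := rest.dropWhile (fun x => pvIsStop x == k)
    (if k then [] else [PySem.Str.join " " (grp.map PySem.Str.lower)]) ++ pvGroups restr
termination_by ts => ts.length
decreasing_by
  simp only [List.length_cons]
  exact Nat.lt_succ_of_le (List.length_dropWhile_le _ _)

-- chunk list A produces from the rest of the tokens given the pending (lowered) run `cur`
def pvCore : List String → List String → List String
  | [], cur => if cur = [] then [] else [PySem.Str.join " " cur]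
  | t :: ts, cur =>
    if pvIsStop t then (if cur = [] then [] else [PySem.Str.join " " cur]) ++ pvCore ts []
    else pvCore ts (cur ++ [PySem.Str.lower t])

def pvFinish (st : List String × List String) : List String :=
  if st.2 ≠ [] then st.1 ++ [PySem.Str.join " " st.2] else st.1

theorem pvGroups_cons (t : String) (rest : List String) :
    pvGroups (t :: rest) =
      (if pvIsStop t then [] else
        [PySem.Str.join " " ((t :: rest.takeWhile (fun x => pvIsStop x == pvIsStop t)).map PySem.Str.lower)])
      ++ pvGroups (rest.dropWhile (fun x => pvIsStop x == pvIsStop t)) := by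
  rw [pvGroups]

theorem pv_fold_core (ts : List String) : ∀ chunks cur : List String,
    pvFinish (List.foldl pvStepA (chunks, cur) ts) = chunks ++ pvCore ts cur := by
  induction ts with
  | nil =>
    intro chunks cur
    by_cases h : cur = [] <;> simp [pvFinish, pvCore, h]
  | cons t ts ih =>
    intro chunks cur
    have hcore : ∀ c, pvCore (t :: ts) c =
        if pvIsStop t then (if c = [] then [] else [PySem.Str.join " " c]) ++ pvCore ts []
        else pvCore ts (c ++ [PySem.Str.lower t]) := fun c => rfl
    rw [List.foldl_cons, hcore]
    cases hs : PySem.Set.contains pvStop (PySem.Str.lower t) with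
    | false =>
      have hs' : pvIsStop t = false := hs
      rw [show pvStepA (chunks, cur) t = (chunks, cur ++ [PySem.Str.lower t]) from by
        simp only [pvStepA]; rw [hs]; simp]
      rw [ih, hs']
      simp
    | true =>
      have hs' : pvIsStop t = true := hs
      rw [hs']
      by_cases hc : cur = []
      · subst hc
        rw [show pvStepA (chunks, []) t = (chunks, []) from by
          simp only [pvStepA]; rw [hs]; simp]
        rw [ih]
        simp
      · rw [show pvStepA (chunks, cur) t = (chunks ++ [PySem.Str.join " " cur], []) from by
          simp only [pvStepA]; rw [hs]; simp [hc]]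
        rw [ih]
        simp [hc]

theorem pv_groups_stop {t : String} (ts : List String) (h : pvIsStop t = true) :
    pvGroups (t :: ts) = pvGroups ts := by
  rw [pvGroups_cons, h]
  simp only [if_pos, List.nil_append]
  cases ts with
  | nil => simp
  | cons u us =>
    cases hu : pvIsStop u with
    | true =>
      rw [List.dropWhile_cons_of_pos (by simp [hu]), pvGroups_cons, hu]
      simp
    | false =>
      rw [List.dropWhile_cons_of_neg (by simp [hu])]

theorem pv_core_groups (ts : List String) : ∀ cur : List String,
    pvCore ts cur =
      if cur = [] then pvGroups ts
      else PySem.Str.join " " (cur ++ (ts.takeWhile (fun x => pvIsStop x == false)).map PySem.Str.lower)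
             :: pvGroups (ts.dropWhile (fun x => pvIsStop x == false)) := by
  induction ts with
  | nil =>
    intro cur
    by_cases h : cur = [] <;> simp [pvCore, pvGroups, h]
  | cons t ts ih =>
    intro cur
    cases hs : pvIsStop t with
    | true =>
      have hg := pv_groups_stop ts hs
      rw [show pvCore (t :: ts) cur =
            (if cur = [] then [] else [PySem.Str.join " " cur]) ++ pvCore ts [] from by
        simp [pvCore, hs]]
      rw [ih, if_pos rfl]
      rw [List.takeWhile_cons_of_neg (by simp [hs]), List.dropWhile_cons_of_neg (by simp [hs])]
      by_cases hc : cur = []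
      · simp [hc, hg]
      · simp [hc, hg]
    | false =>
      rw [show pvCore (t :: ts) cur = pvCore ts (cur ++ [PySem.Str.lower t]) from by
        simp [pvCore, hs]]
      rw [ih, if_neg (by simp)]
      rw [List.takeWhile_cons_of_pos (by simp [hs]), List.dropWhile_cons_of_pos (by simp [hs])]
      by_cases hc : cur = []
      · subst hc
        rw [if_pos rfl, pvGroups_cons, hs]
        simp
      · rw [if_neg hc]
        simp

-- ===== B-side machinery: cut positions and slices =====

-- the cut list of B's port without the leading -1
def pvT (tokens : List String) : List Int :=
  ((PySem.List.enumerate (tokens.map PySem.Str.lower) 0).filter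
      (fun p => PySem.Set.contains pvStop p.2)).map (fun p => p.1)
    ++ [((tokens.map PySem.Str.lower).length : Int)]

def pvChunksOf (lows : List String) (cuts : List Int) : List String :=
  ((cuts.zip (cuts.drop 1)).filter (fun p => p.2 - p.1 > 1)).map
    (fun p => PySem.Str.join " " (PySem.List.slice lows (some (p.1 + 1)) (some p.2)))

theorem pv_enumerate_shift {α : Type} (ls : List α) : ∀ s : Int,
    PySem.List.enumerate ls (s + 1) =
      (PySem.List.enumerate ls s).map (fun p => (p.1 + 1, p.2)) := by
  induction ls with
  | nil => intro s; simp [PySem.List.enumerate_nil]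
  | cons x xs ih => intro s; simp [PySem.List.enumerate_cons, ih (s + 1)]

theorem pvT_cons (x : String) (xs : List String) :
    pvT (x :: xs) =
      if pvIsStop x then 0 :: (pvT xs).map (· + 1) else (pvT xs).map (· + 1) := by
  unfold pvT
  rw [List.map_cons, PySem.List.enumerate_cons, pv_enumerate_shift]
  rw [List.filter_cons]
  cases hs : pvIsStop x with
  | true =>
    rw [show (pvStop.contains ((0 : Int), PySem.Str.lower x).2) = pvIsStop x from rfl, hs]
    simp [List.filter_map, List.map_map, Function.comp_def]
  | false =>
    rw [show (pvStop.contains ((0 : Int), PySem.Str.lower x).2) = pvIsStop x from rfl, hs]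
    simp [List.filter_map, List.map_map, Function.comp_def]

theorem pvT_nonneg (xs : List String) : ∀ c ∈ pvT xs, 0 ≤ c := by
  induction xs with
  | nil => intro c hc; simp [pvT, PySem.List.enumerate_nil] at hc; omega
  | cons x xs ih =>
    intro c hc
    rw [pvT_cons] at hc
    by_cases hs : pvIsStop x <;> simp [hs] at hc
    · rcases hc with h0 | ⟨d, hd, rfl⟩
      · omega
      · have := ih d hd; omega
    · rcases hc with ⟨d, hd, rfl⟩
      have := ih d hd; omega

theorem pvT_head (xs : List String) :
    ∃ rest, pvT xs = ((xs.takeWhile (fun x => pvIsStop x == false)).length : Int) :: rest := by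
  induction xs with
  | nil => exact ⟨[], by simp [pvT, PySem.List.enumerate_nil]⟩
  | cons x xs ih =>
    rcases ih with ⟨rest, hrest⟩
    rw [pvT_cons]
    cases hs : pvIsStop x with
    | true =>
      refine ⟨(pvT xs).map (· + 1), ?_⟩
      rw [List.takeWhile_cons_of_neg (by simp [hs])]
      simp
    | false =>
      refine ⟨rest.map (· + 1), ?_⟩
      rw [List.takeWhile_cons_of_pos (by simp [hs]), hrest]
      simp

theorem pv_slice_shift {α : Type} (x : α) (xs : List α) (k m : Int) (hk : 0 ≤ k) (hm : 0 ≤ m) :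
    PySem.List.slice (x :: xs) (some (k + 1)) (some (m + 1)) =
      PySem.List.slice xs (some k) (some m) := by
  obtain ⟨a, rfl⟩ : ∃ a : Nat, k = (a : Int) := ⟨k.toNat, (Int.toNat_of_nonneg hk).symm⟩
  obtain ⟨b, rfl⟩ : ∃ b : Nat, m = (b : Int) := ⟨m.toNat, (Int.toNat_of_nonneg hm).symm⟩
  have h1 : ((a : Int) + 1) = ((a + 1 : Nat) : Int) := by push_cast; ring
  have h2 : ((b : Int) + 1) = ((b + 1 : Nat) : Int) := by push_cast; ring
  rw [h1, h2, PySem.List.slice_natCast, PySem.List.slice_natCast]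
  simp [Nat.succ_sub_succ]

theorem pvChunksOf_singleton (lows : List String) (c : Int) :
    pvChunksOf lows [c] = [] := by
  simp [pvChunksOf]

theorem pvChunksOf_cons₂ (lows : List String) (a b : Int) (r : List Int) :
    pvChunksOf lows (a :: b :: r) =
      (if b - a > 1 then [PySem.Str.join " " (PySem.List.slice lows (some (a + 1)) (some b))] else [])
        ++ pvChunksOf lows (b :: r) := by
  simp only [pvChunksOf, List.drop_succ_cons, List.drop_zero, List.zip_cons_cons, List.filter_cons]
  by_cases h : b - a > 1 <;> simp [h]

theorem pvChunksOf_shift (l : String) (ls : List String) (cuts : List Int)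
    (h1 : ∀ c ∈ cuts, -1 ≤ c) (h2 : ∀ c ∈ cuts.drop 1, 0 ≤ c) :
    pvChunksOf (l :: ls) (cuts.map (· + 1)) = pvChunksOf ls cuts := by
  unfold pvChunksOf
  have hdrop : (cuts.map (· + 1)).drop 1 = (cuts.drop 1).map (· + 1) := by
    exact Eq.symm List.map_drop
  rw [hdrop, List.zip_map]
  rw [List.filter_map, List.map_map]
  have hfil : (cuts.zip (cuts.drop 1)).filter
        ((fun p : Int × Int => decide (p.2 - p.1 > 1)) ∘ Prod.map (· + 1) (· + 1)) =
      (cuts.zip (cuts.drop 1)).filter (fun p => p.2 - p.1 > 1) := by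
    apply List.filter_congr
    intro p _
    simp only [Function.comp, Prod.map]
    congr 1
    exact propext (by omega)
  rw [hfil]
  apply List.map_congr_left
  intro p hp
  have hmem := List.mem_filter.mp hp
  have hz := List.of_mem_zip hmem.1
  have ha : -1 ≤ p.1 := h1 _ hz.1
  have hb : 0 ≤ p.2 := h2 _ hz.2
  simp only [Function.comp, Prod.map]
  have : (p.1 + 1 + 1 : Int) = (p.1 + 1) + 1 := by ring
  rw [this, pv_slice_shift l ls (p.1 + 1) p.2 (by omega) hb]

theorem pv_take_takeWhile {α : Type} (p : α → Bool) (l : List α) :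
    l.take (l.takeWhile p).length = l.takeWhile p := by
  induction l with
  | nil => simp
  | cons x xs ih => by_cases h : p x <;> simp [h, ih]

theorem pv_chunks_groups (tokens : List String) :
    pvChunksOf (tokens.map PySem.Str.lower) (-1 :: pvT tokens) = pvGroups tokens ∧
    pvChunksOf (tokens.map PySem.Str.lower) (pvT tokens) =
      pvGroups (tokens.dropWhile (fun x => pvIsStop x == false)) := by
  induction tokens with
  | nil =>
    constructor
    · rw [show pvT [] = [(0 : Int)] from by simp [pvT, PySem.List.enumerate_nil]]
      rw [pvChunksOf_cons₂]
      simp [pvChunksOf_singleton, pvGroups]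
    · rw [show pvT [] = [(0 : Int)] from by simp [pvT, PySem.List.enumerate_nil]]
      simp [pvChunksOf_singleton, pvGroups]
  | cons l ls ih =>
    rcases ih with ⟨ihK, ihN⟩
    have hshift1 : pvChunksOf (PySem.Str.lower l :: ls.map PySem.Str.lower)
          ((-1 :: pvT ls).map (· + 1)) = pvChunksOf (ls.map PySem.Str.lower) (-1 :: pvT ls) := by
      apply pvChunksOf_shift
      · intro c hc
        rcases hc with _ | hc
        · omega
        · have := pvT_nonneg ls c (by assumption); omega
      · intro c hc
        simp at hc
        exact pvT_nonneg ls c hc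
    have hshift2 : pvChunksOf (PySem.Str.lower l :: ls.map PySem.Str.lower)
          ((pvT ls).map (· + 1)) = pvChunksOf (ls.map PySem.Str.lower) (pvT ls) := by
      apply pvChunksOf_shift
      · intro c hc
        have := pvT_nonneg ls c hc; omega
      · intro c hc
        exact pvT_nonneg ls c (List.mem_of_mem_drop hc)
    cases hs : pvIsStop l with
    | true =>
      have hTc : pvT (l :: ls) = 0 :: (pvT ls).map (· + 1) := by rw [pvT_cons, if_pos hs]
      have hmap : ((-1 : Int) :: pvT ls).map (· + 1) = 0 :: (pvT ls).map (· + 1) := by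
        simp
      have hN : pvChunksOf ((l :: ls).map PySem.Str.lower) (pvT (l :: ls)) = pvGroups ls := by
        rw [List.map_cons, hTc, ← hmap, hshift1, ihK]
      constructor
      · rw [List.map_cons, hTc, pvChunksOf_cons₂]
        rw [if_neg (by omega)]
        rw [show (0 : Int) :: (pvT ls).map (· + 1) = ((-1 : Int) :: pvT ls).map (· + 1) from hmap.symm]
        rw [hshift1, ihK, List.nil_append, pv_groups_stop ls hs]
      · rw [hN, List.dropWhile_cons_of_neg (by simp [hs]), pv_groups_stop ls hs]
    | false =>
      have hTc : pvT (l :: ls) = (pvT ls).map (· + 1) := by rw [pvT_cons, if_neg (by simp [hs])]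
      rcases pvT_head ls with ⟨rest, hhead⟩
      set r : Nat := (ls.takeWhile (fun x => pvIsStop x == false)).length with hr
      have hN : pvChunksOf ((l :: ls).map PySem.Str.lower) (pvT (l :: ls)) =
          pvGroups (ls.dropWhile (fun x => pvIsStop x == false)) := by
        rw [List.map_cons, hTc, hshift2, ihN]
      constructor
      · rw [List.map_cons, hTc, hhead, List.map_cons, pvChunksOf_cons₂]
        rw [if_pos (by omega)]
        have hslice : PySem.List.slice (PySem.Str.lower l :: ls.map PySem.Str.lower)
              (some ((-1 : Int) + 1)) (some ((r : Int) + 1)) =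
            PySem.Str.lower l :: (ls.takeWhile (fun x => pvIsStop x == false)).map PySem.Str.lower := by
          have h1 : ((-1 : Int) + 1) = ((0 : Nat) : Int) := by norm_num
          have h2 : ((r : Int) + 1) = ((r + 1 : Nat) : Int) := by push_cast; ring
          rw [h1, h2, PySem.List.slice_natCast]
          simp only [List.drop_zero, Nat.sub_zero, List.take_succ_cons]
          congr 1
          rw [← List.map_take, hr, pv_take_takeWhile _ _]
        rw [hslice]
        have hrest : pvChunksOf (PySem.Str.lower l :: ls.map PySem.Str.lower)
              (((r : Int) + 1) :: rest.map (· + 1)) =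
            pvGroups (ls.dropWhile (fun x => pvIsStop x == false)) := by
          have : ((r : Int) + 1) :: rest.map (· + 1) = ((r : Int) :: rest).map (· + 1) := by simp
          rw [this, ← hhead, hshift2, ihN]
        rw [hrest, pvGroups_cons, hs]
        simp
      · rw [List.dropWhile_cons_of_pos (by simp [hs])]
        exact hN

-- ===== VERDICT (by name: the statement is the Claim_ definition above) =====
theorem phrase_chunks_py_spec : Claim_equal_phrase_chunks_py := by
  intro tokens _
  unfold Spec_phrase_chunks_py
  have hB : phrase_chunks_py_alt tokens =
      (pvChunksOf (tokens.map PySem.Str.lower) (-1 :: pvT tokens)).filter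
        (fun c => PySem.Str.len (PySem.Str.replace c " " "") > 2) := rfl
  rw [hB, (pv_chunks_groups tokens).1]
  show (pvFinish (List.foldl pvStepA ([], []) tokens)).filter
        (fun c => PySem.Str.len (PySem.Str.replace c " " "") > 2) = _
  rw [pv_fold_core tokens [] [], List.nil_append, pv_core_groups tokens [], if_pos rfl]
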